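-- pv_equiv track=rewrite | github.com/sungwoopark95/QualExamCoding | soungmunkim/Python/Hashing/HW12_3_LongestSubListInSameRange_SM.py | P3_withfunc
-- ===== SOURCE A (Python) =====
-- def P3_withfunc(A, B):
--
--     # 누적 합 구하는 함수
--     def get_cumulative_sum(nums):
--         cum_sum = [0]
--         total = 0
--         for num in nums:
--             total += num
--             cum_sum.append(total)
--         return cum_sum
--     # 누적합을 각 리스트 마다 만들기
--     cum_sum_A = get_cumulative_sum(A)
--     cum_sum_B = get_cumulative_sum(B)
--
--     max_len = 0
--     sum_diff = {}
--
--     # 각 위치에서의 누적 합의 차이를 저장하며 동일한 차이를 가진 위치를 찾는다.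
--     for i in range(len(A) + 1):
--         diff = cum_sum_A[i] - cum_sum_B[i]
--
--         # 만약 동일한 차이가 이전에 나타났다면
--         if diff in sum_diff:
--             # 현재 위치와 이전 위치의 차이를 길이로 계산
--             length = i - sum_diff[diff]
--             max_len = max(max_len, length)
--         else:
--             sum_diff[diff] = i
--
--     return max_len
-- ===== SOURCE B (Python) =====
-- def P3_withfunc(A, B):
--     # Sort-and-scan instead of a first-occurrence hash map: list every prefix
--     # difference with its position, sort by the difference so equal differences
--     # become contiguous runs, and take the widest position spread of any run.
--     pairs = [(0, 0)]
--     d = 0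
--     for i in range(len(A)):
--         d += A[i] - B[i]
--         pairs.append((d, i + 1))
--     pairs.sort(key=lambda t: t[0])
--     best = 0
--     v, lo, hi = pairs[0][0], pairs[0][1], pairs[0][1]
--     for e in pairs[1:]:
--         if e[0] == v:
--             lo = min(lo, e[1])
--             hi = max(hi, e[1])
--         else:
--             best = max(best, hi - lo)
--             v, lo, hi = e[0], e[1], e[1]
--     return max(best, hi - lo)
-- ===== Notes on version B (the rewrite author's own statement) =====
-- stated objective: alternative
-- what changed: Replaces the first-occurrence hash map with a sort-and-scan: it materialises all (prefix-difference, position) pairs, sorts them by difference so equal differences form contiguous runs, and returns the widest min-to-max position spread of any run.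
import Mathlib
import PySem

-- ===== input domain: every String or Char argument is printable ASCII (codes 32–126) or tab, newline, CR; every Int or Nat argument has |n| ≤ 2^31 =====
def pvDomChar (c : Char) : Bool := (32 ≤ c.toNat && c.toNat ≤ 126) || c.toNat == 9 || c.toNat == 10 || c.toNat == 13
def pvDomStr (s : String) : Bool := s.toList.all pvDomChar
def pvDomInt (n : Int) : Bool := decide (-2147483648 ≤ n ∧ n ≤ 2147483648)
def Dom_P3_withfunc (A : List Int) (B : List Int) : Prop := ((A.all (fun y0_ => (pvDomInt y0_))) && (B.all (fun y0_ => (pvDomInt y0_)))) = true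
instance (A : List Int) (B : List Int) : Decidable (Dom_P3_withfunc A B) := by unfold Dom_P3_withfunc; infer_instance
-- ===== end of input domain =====

-- B replaces A's first-occurrence hash map with a sort-and-scan over all
-- (prefix-difference, position) pairs (objective: alternative, same result).

-- ===== PORT A =====
def getCumulativeSum (nums : List Int) : List Int :=
  (nums.foldl (fun (st : List Int × Int) num =>
      let total := st.2 + num
      (st.1 ++ [total], total)) ([0], 0)).1

def P3_withfunc (A : List Int) (B : List Int) : Int :=
  let cumA := getCumulativeSum A
  let cumB := getCumulativeSum B
  ((PySem.List.pyRange 0 ((A.length : Int) + 1) 1).foldl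
    (fun (st : Int × PySem.Dict Int Int) i =>
      -- cum_sum[i]: in range for every admitted input (Pre_ below); .getD 0 never fires there
      let diff := (PySem.List.pyGet? cumA i).getD 0 - (PySem.List.pyGet? cumB i).getD 0
      match st.2.get? diff with
      | some j => (max st.1 (i - j), st.2)
      | none => (st.1, st.2.insert diff i)) (0, PySem.Dict.empty)).1

-- ===== PORT B =====
def P3_withfunc_alt (A : List Int) (B : List Int) : Int :=
  let built := (PySem.List.pyRange 0 (A.length : Int) 1).foldl
    (fun (st : List (Int × Int) × Int) i =>
      -- A[i], B[i]: in range for every admitted input (Pre_ below); .getD 0 never fires there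
      let d := st.2 + (PySem.List.pyGet? A i).getD 0 - (PySem.List.pyGet? B i).getD 0
      (st.1 ++ [(d, i + 1)], d)) ([((0 : Int), (0 : Int))], 0)
  let pairs := built.1
  let sp := PySem.List.sorted pairs (fun t => t.1) false
  match sp with
  | [] => 0   -- unreachable: pairs always holds the (0, 0) sentinel
  | h :: tl =>
    let fin := tl.foldl
      (fun (st : Int × Int × Int × Int) e =>
        if e.1 == st.2.1 then (st.1, st.2.1, min st.2.2.1 e.2, max st.2.2.2 e.2)
        else (max st.1 (st.2.2.2 - st.2.2.1), e.1, e.2, e.2))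
      (0, h.1, h.2, h.2)
    max fin.1 (fin.2.2.2 - fin.2.2.1)

-- ===== PRECONDITION & SPEC =====
-- Both Pythons raise IndexError when len(A) > len(B) (A indexes cum_sum_B[i], B indexes B[i]).
def Pre_P3_withfunc (A : List Int) (B : List Int) : Prop := A.length ≤ B.length
instance (A : List Int) (B : List Int) : Decidable (Pre_P3_withfunc A B) := by unfold Pre_P3_withfunc; infer_instance
def pvWitness_P3_withfunc : List Int × List Int := ([1, -2, 3], [3, -2, 1, 7])

def Spec_P3_withfunc (A : List Int) (B : List Int) (out : Int) : Prop := out = P3_withfunc_alt A B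
instance (A : List Int) (B : List Int) (out : Int) : Decidable (Spec_P3_withfunc A B out) := by unfold Spec_P3_withfunc; infer_instance

-- ===== CLAIM (what is proved, stated in full; the proofs are below) =====
def Claim_equal_P3_withfunc : Prop := ∀ (A : List Int) (B : List Int), Dom_P3_withfunc A B → Pre_P3_withfunc A B → Spec_P3_withfunc A B (P3_withfunc A B)

-- ===== LEMMAS AND PROOFS =====

-- prefix difference p i = sum(A[:i]) - sum(B[:i])
def pref (A B : List Int) (i : ℕ) : Int := (A.take i).sum - (B.take i).sum

-- first (smallest) index whose prefix difference equals that of i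
def fo (A B : List Int) (i : ℕ) : ℕ :=
  Nat.find (⟨i, rfl⟩ : ∃ j, pref A B j = pref A B i)

-- the gap contributed by index i
def g (A B : List Int) (i : ℕ) : Int := (i : Int) - (fo A B i : Int)

-- the pair list B materialises
def pairsL (A B : List Int) : List (Int × Int) :=
  (List.range (A.length + 1)).map (fun i => (pref A B i, (i : Int)))

theorem fo_spec (A B : List Int) (i : ℕ) : pref A B (fo A B i) = pref A B i :=
  Nat.find_spec (⟨i, rfl⟩ : ∃ j, pref A B j = pref A B i)

theorem fo_min (A B : List Int) (i j : ℕ) (h : pref A B j = pref A B i) : fo A B i ≤ j :=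
  Nat.find_min' _ h

theorem fo_le (A B : List Int) (i : ℕ) : fo A B i ≤ i := fo_min A B i i rfl

theorem fo_eq_of_min (A B : List Int) (i t : ℕ) (h1 : pref A B t = pref A B i)
    (h2 : ∀ t' < t, pref A B t' ≠ pref A B i) : fo A B i = t := by
  have hle : fo A B i ≤ t := fo_min A B i t h1
  rcases lt_or_eq_of_le hle with hlt | he
  · exact absurd (fo_spec A B i) (h2 _ hlt)
  · exact he

theorem fo_self (A B : List Int) (i : ℕ) (h : ∀ t < i, pref A B t ≠ pref A B i) :
    fo A B i = i := fo_eq_of_min A B i i rfl h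

theorem foldl_max_le (l : List Int) (b x : Int) (hb : b ≤ x) (h : ∀ y ∈ l, y ≤ x) :
    l.foldl max b ≤ x := by
  induction l generalizing b with
  | nil => exact hb
  | cons y t ih =>
    exact ih (max b y) (max_le hb (h y (by simp))) (fun z hz => h z (by simp [hz]))

-- the cumulative-sum list is the list of prefix sums
theorem getCum_aux (l : List Int) (cs : List Int) (t : Int) :
    l.foldl (fun (st : List Int × Int) num =>
      let total := st.2 + num
      (st.1 ++ [total], total)) (cs, t)
    = (cs ++ (List.range l.length).map (fun i => t + (l.take (i + 1)).sum), t + l.sum) := by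
  induction l generalizing cs t with
  | nil => simp
  | cons x xs ih =>
    simp only [List.foldl_cons, ih, List.length_cons, List.range_succ_eq_map,
      List.map_cons, List.map_map, Prod.mk.injEq]
    constructor
    · rw [List.append_assoc]
      congr 1
      simp only [List.singleton_append]
      congr 1
      · simp
      · apply List.map_congr_left; intro i _
        simp [Function.comp, List.take_succ_cons]; ring
    · simp; ring

theorem getCum_eq (l : List Int) :
    getCumulativeSum l = (List.range (l.length + 1)).map (fun i => (l.take i).sum) := by
  unfold getCumulativeSum
  rw [getCum_aux]
  rw [List.range_succ_eq_map]
  simp [List.map_map, Function.comp]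

theorem getCum_get (l : List Int) (i : ℕ) (hi : i ≤ l.length) :
    (PySem.List.pyGet? (getCumulativeSum l) (i : Int)).getD 0 = (l.take i).sum := by
  rw [getCum_eq, PySem.List.pyGet?_natCast]
  rw [List.getElem?_map, List.getElem?_range (by omega)]
  rfl

theorem pref_succ (A B : List Int) (i : ℕ) (hA : i < A.length) (hB : i < B.length) :
    pref A B (i + 1) = pref A B i + A[i] - B[i] := by
  unfold pref
  rw [List.sum_take_succ A i hA, List.sum_take_succ B i hB]
  ring

-- ===== A-side: the dict fold computes foldl max over g =====
theorem A_loop (A B : List Int) (hAB : A.length ≤ B.length) :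
    ∀ (k j : ℕ), j + k = A.length + 1 →
    ∀ (m : Int) (dct : PySem.Dict Int Int), 0 ≤ m →
    (∀ w x, dct.get? w = some x ↔
      ∃ t : ℕ, t < j ∧ pref A B t = w ∧ x = (t : Int) ∧ ∀ t' < t, pref A B t' ≠ w) →
    ((PySem.List.pyRange (j : Int) ((A.length : Int) + 1) 1).foldl
      (fun (st : Int × PySem.Dict Int Int) i =>
        let diff := (PySem.List.pyGet? (getCumulativeSum A) i).getD 0 -
                    (PySem.List.pyGet? (getCumulativeSum B) i).getD 0
        match st.2.get? diff with
        | some v => (max st.1 (i - v), st.2)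
        | none => (st.1, st.2.insert diff i)) (m, dct)).1
    = ((List.range' j k).map (g A B)).foldl max m := by
  intro k
  induction k with
  | zero =>
    intro j hjk m dct _ _
    rw [PySem.List.pyRange_one_eq_nil (by omega)]
    simp
  | succ k ih =>
    intro j hjk m dct hm Hd
    have hjn : j ≤ A.length := by omega
    have hjB : j ≤ B.length := by omega
    rw [PySem.List.pyRange_one_cons (by omega)]
    simp only [List.foldl_cons]
    have hdA : (PySem.List.pyGet? (getCumulativeSum A) (j : Int)).getD 0 = (A.take j).sum :=
      getCum_get A j hjn
    have hdB : (PySem.List.pyGet? (getCumulativeSum B) (j : Int)).getD 0 = (B.take j).sum :=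
      getCum_get B j hjB
    have hdiff : (PySem.List.pyGet? (getCumulativeSum A) (j : Int)).getD 0 -
        (PySem.List.pyGet? (getCumulativeSum B) (j : Int)).getD 0 = pref A B j := by
      rw [hdA, hdB]; rfl
    have hrange : List.range' j (k + 1) = j :: List.range' (j + 1) k := List.range'_succ
    have hcast : ((j : Int) + 1) = ((j + 1 : ℕ) : Int) := by push_cast; ring
    rw [hdiff]
    cases hget : dct.get? (pref A B j) with
    | some x =>
      obtain ⟨t, htj, htp, hx, hmin⟩ := (Hd (pref A B j) x).mp hget
      have hfo : fo A B j = t := fo_eq_of_min A B j t htp hmin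
      have hgj : (j : Int) - x = g A B j := by
        rw [hx, ← hfo]; rfl
      have Hd' : ∀ w x, dct.get? w = some x ↔
          ∃ t : ℕ, t < j + 1 ∧ pref A B t = w ∧ x = (t : Int) ∧ ∀ t' < t, pref A B t' ≠ w := by
        intro w y
        rw [Hd w y]
        constructor
        · rintro ⟨s, hs1, hs2, hs3, hs4⟩
          exact ⟨s, by omega, hs2, hs3, hs4⟩
        · rintro ⟨s, hs1, hs2, hs3, hs4⟩
          rcases Nat.lt_succ_iff_lt_or_eq.mp hs1 with hlt | heq
          · exact ⟨s, hlt, hs2, hs3, hs4⟩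
          · exfalso
            by_cases hw : w = pref A B j
            · exact hs4 t (by omega) (htp.trans hw.symm)
            · exact hw ((heq ▸ hs2 : pref A B j = w)).symm
      have := ih (j + 1) (by omega) (max m ((j : Int) - x)) dct
        (le_trans hm (le_max_left _ _)) Hd'
      rw [hcast, this, hrange, List.map_cons, List.foldl_cons, hgj]
    | none =>
      have Hnone : ∀ t < j, pref A B t ≠ pref A B j := by
        by_contra hcon
        push Not at hcon
        obtain ⟨t, ht, hp⟩ := hcon
        have hex : ∃ s, s < j ∧ pref A B s = pref A B j := ⟨t, ht, hp⟩
        set t0 := Nat.find hex with ht0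
        obtain ⟨ht0j, ht0p⟩ := Nat.find_spec hex
        have hmin0 : ∀ t' < t0, pref A B t' ≠ pref A B j := by
          intro t' ht'
          have := Nat.find_min hex ht'
          intro hp'
          exact this ⟨by omega, hp'⟩
        have : dct.get? (pref A B j) = some (t0 : Int) :=
          (Hd (pref A B j) (t0 : Int)).mpr ⟨t0, ht0j, ht0p, rfl, hmin0⟩
        rw [hget] at this
        exact absurd this (by simp)
      have hfo : fo A B j = j := fo_self A B j Hnone
      have hgj : g A B j = 0 := by
        unfold g; rw [hfo]; ring
      have Hd' : ∀ w y, (dct.insert (pref A B j) (j : Int)).get? w = some y ↔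
          ∃ t : ℕ, t < j + 1 ∧ pref A B t = w ∧ y = (t : Int) ∧ ∀ t' < t, pref A B t' ≠ w := by
        intro w y
        rw [PySem.Dict.get?_insert]
        by_cases hw : w = pref A B j
        · subst hw
          rw [if_pos rfl]
          constructor
          · intro hsome
            have hy : y = (j : Int) := by
              injection hsome with h; exact h.symm
            exact ⟨j, by omega, rfl, hy, Hnone⟩
          · rintro ⟨s, hs1, hs2, hs3, hs4⟩
            have hsj : s = j := by
              rcases Nat.lt_succ_iff_lt_or_eq.mp hs1 with hlt | heq
              · exact absurd hs2 (Hnone s hlt)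
              · exact heq
            subst hsj
            rw [hs3]
        · simp only [if_neg hw]
          rw [Hd w y]
          constructor
          · rintro ⟨s, hs1, hs2, hs3, hs4⟩
            exact ⟨s, by omega, hs2, hs3, hs4⟩
          · rintro ⟨s, hs1, hs2, hs3, hs4⟩
            rcases Nat.lt_succ_iff_lt_or_eq.mp hs1 with hlt | heq
            · exact ⟨s, hlt, hs2, hs3, hs4⟩
            · subst heq
              exact absurd hs2 (by simp_all)
      have := ih (j + 1) (by omega) m (dct.insert (pref A B j) (j : Int)) hm Hd'
      rw [hcast, this, hrange, List.map_cons, List.foldl_cons, hgj, max_eq_left hm]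

-- ===== B-side: the built list is pairsL =====
theorem build_pairs (A B : List Int) (hAB : A.length ≤ B.length) :
    ((PySem.List.pyRange 0 (A.length : Int) 1).foldl
      (fun (st : List (Int × Int) × Int) i =>
        let d := st.2 + (PySem.List.pyGet? A i).getD 0 - (PySem.List.pyGet? B i).getD 0
        (st.1 ++ [(d, i + 1)], d)) ([((0 : Int), (0 : Int))], 0)).1 = pairsL A B := by
  have aux : ∀ (k j : ℕ), j + k = A.length → ∀ (lst : List (Int × Int)),
      ((PySem.List.pyRange (j : Int) (A.length : Int) 1).foldl
        (fun (st : List (Int × Int) × Int) i =>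
          let d := st.2 + (PySem.List.pyGet? A i).getD 0 - (PySem.List.pyGet? B i).getD 0
          (st.1 ++ [(d, i + 1)], d)) (lst, pref A B j)).1
      = lst ++ (List.range' (j + 1) k).map (fun i => (pref A B i, (i : Int))) := by
    intro k
    induction k with
    | zero =>
      intro j hjk lst
      rw [PySem.List.pyRange_one_eq_nil (by omega)]
      simp
    | succ k ih =>
      intro j hjk lst
      have hjA : j < A.length := by omega
      have hjB : j < B.length := by omega
      rw [PySem.List.pyRange_one_cons (by omega)]
      simp only [List.foldl_cons]
      have hAj : (PySem.List.pyGet? A (j : Int)).getD 0 = A[j] := by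
        rw [PySem.List.pyGet?_natCast, List.getElem?_eq_getElem hjA]; rfl
      have hBj : (PySem.List.pyGet? B (j : Int)).getD 0 = B[j] := by
        rw [PySem.List.pyGet?_natCast, List.getElem?_eq_getElem hjB]; rfl
      have hd : pref A B j + (PySem.List.pyGet? A (j : Int)).getD 0 -
          (PySem.List.pyGet? B (j : Int)).getD 0 = pref A B (j + 1) := by
        rw [hAj, hBj, pref_succ A B j hjA hjB]
      have hcast : ((j : Int) + 1) = ((j + 1 : ℕ) : Int) := by push_cast; ring
      have := ih (j + 1) (by omega) (lst ++ [(pref A B (j + 1), ((j + 1 : ℕ) : Int))])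
      simp only at this ⊢
      rw [hd, hcast, this]
      rw [List.range'_succ]
      simp [List.append_assoc]
  have h0 : pref A B 0 = 0 := by simp [pref]
  have hinit : (([((0 : Int), (0 : Int))], (0 : Int)) : List (Int × Int) × Int)
      = ([((0 : Int), (0 : Int))], pref A B 0) := by rw [h0]
  rw [hinit]
  have := aux A.length 0 (by omega) [((0 : Int), (0 : Int))]
  simp only [Nat.cast_zero] at this
  rw [this]
  unfold pairsL
  rw [List.range_eq_range', List.range'_succ]
  simp [h0]

-- the scan step and the scan result (the fold in P3_withfunc_alt, named for the lemmas)
def scanStep (st : Int × Int × Int × Int) (e : Int × Int) : Int × Int × Int × Int :=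
  if e.1 == st.2.1 then (st.1, st.2.1, min st.2.2.1 e.2, max st.2.2.2 e.2)
  else (max st.1 (st.2.2.2 - st.2.2.1), e.1, e.2, e.2)

def scanR (T : List (Int × Int)) (b v lo hi : Int) : Int :=
  max (T.foldl scanStep (b, v, lo, hi)).1
    ((T.foldl scanStep (b, v, lo, hi)).2.2.2 - (T.foldl scanStep (b, v, lo, hi)).2.2.1)

theorem scanR_nil (b v lo hi : Int) : scanR [] b v lo hi = max b (hi - lo) := rfl

theorem scanR_cons_eq (e : Int × Int) (T : List (Int × Int)) (b v lo hi : Int) (h : e.1 = v) :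
    scanR (e :: T) b v lo hi = scanR T b v (min lo e.2) (max hi e.2) := by
  simp [scanR, scanStep, h]

theorem scanR_cons_ne (e : Int × Int) (T : List (Int × Int)) (b v lo hi : Int) (h : ¬ e.1 = v) :
    scanR (e :: T) b v lo hi = scanR T (max b (hi - lo)) e.1 e.2 e.2 := by
  have hbeq : (e.1 == v) = false := by simpa using h
  simp [scanR, scanStep, hbeq]

-- scan upper bound: the scan result never exceeds any bound x that dominates
-- all same-difference position gaps of the ambient list P
theorem scanUB (P : List (Int × Int)) (x : Int)
    (Hpairs : ∀ e1 ∈ P, ∀ e2 ∈ P, e1.1 = e2.1 → e1.2 - e2.2 ≤ x) :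
    ∀ (T : List (Int × Int)) (b v lo hi : Int),
      b ≤ x → hi - lo ≤ x → (v, lo) ∈ P → (v, hi) ∈ P → (∀ e ∈ T, e ∈ P) →
      scanR T b v lo hi ≤ x := by
  intro T
  induction T with
  | nil =>
    intro b v lo hi hb hcur _ _ _
    rw [scanR_nil]
    exact max_le hb hcur
  | cons e T ih =>
    intro b v lo hi hb hcur hloP hhiP hsub
    have heP : e ∈ P := hsub e (by simp)
    by_cases hev : e.1 = v
    · rw [scanR_cons_eq e T b v lo hi hev]
      have he' : (v, e.2) ∈ P := by
        have : e = (v, e.2) := by cases e; simp_all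
        rwa [this] at heP
      have hlo' : (v, min lo e.2) ∈ P := by
        rcases min_choice lo e.2 with h | h <;> rw [h] <;> assumption
      have hhi' : (v, max hi e.2) ∈ P := by
        rcases max_choice hi e.2 with h | h <;> rw [h] <;> assumption
      have hcur' : max hi e.2 - min lo e.2 ≤ x := by
        have h2 : hi - e.2 ≤ x := Hpairs (v, hi) hhiP (v, e.2) he' rfl
        have h3 : e.2 - lo ≤ x := Hpairs (v, e.2) he' (v, lo) hloP rfl
        have h4 : (0 : Int) ≤ x := by have := Hpairs e heP e heP rfl; omega
        rcases max_choice hi e.2 with hM | hM <;> rcases min_choice lo e.2 with hm | hm <;>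
          rw [hM, hm] <;> omega
      exact ih _ _ _ _ hb hcur' hlo' hhi' (fun z hz => hsub z (by simp [hz]))
    · rw [scanR_cons_ne e T b v lo hi hev]
      have h0 : (0 : Int) ≤ x := by have := Hpairs e heP e heP rfl; omega
      exact ih _ _ _ _ (max_le hb hcur) (by omega) heP heP
        (fun z hz => hsub z (by simp [hz]))

-- scan lower bound: the scan result dominates b, the current spread, and every
-- same-difference position gap of the remaining (sorted) tail
theorem scanLB (T : List (Int × Int)) :
    ∀ (b v lo hi : Int),
      T.Pairwise (fun a c => a.1 ≤ c.1) → (∀ e ∈ T, v ≤ e.1) → lo ≤ hi →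
      b ≤ scanR T b v lo hi ∧ hi - lo ≤ scanR T b v lo hi ∧
      (∀ e ∈ T, e.1 = v → e.2 - lo ≤ scanR T b v lo hi ∧ hi - e.2 ≤ scanR T b v lo hi) ∧
      (∀ e1 ∈ T, ∀ e2 ∈ T, e1.1 = e2.1 → e1.2 - e2.2 ≤ scanR T b v lo hi) := by
  induction T with
  | nil =>
    intro b v lo hi _ _ _
    rw [scanR_nil]
    exact ⟨le_max_left _ _, le_max_right _ _, by simp, by simp⟩
  | cons e T ih =>
    intro b v lo hi hsort hge hlh
    have hsort' : T.Pairwise (fun a c => a.1 ≤ c.1) := hsort.of_cons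
    have hhead : ∀ z ∈ T, e.1 ≤ z.1 := (List.pairwise_cons.mp hsort).1
    by_cases hev : e.1 = v
    · rw [scanR_cons_eq e T b v lo hi hev]
      have hlh' : min lo e.2 ≤ max hi e.2 :=
        le_trans (min_le_left _ _) (le_trans hlh (le_max_left _ _))
      obtain ⟨ihb, ihcur, ihrun, ihpairs⟩ :=
        ih b v (min lo e.2) (max hi e.2) hsort' (fun z hz => hge z (by simp [hz])) hlh'
      set R := scanR T b v (min lo e.2) (max hi e.2) with hR
      have hcur : hi - lo ≤ R := by
        have := ihcur
        have h1 : min lo e.2 ≤ lo := min_le_left _ _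
        have h2 : hi ≤ max hi e.2 := le_max_left _ _
        omega
      refine ⟨ihb, hcur, ?_, ?_⟩
      · intro z hz hzv
        rcases List.mem_cons.mp hz with hze | hzT
        · subst hze
          have h1 : z.2 ≤ max hi z.2 := le_max_right _ _
          have h2 : min lo z.2 ≤ z.2 := min_le_right _ _
          have h3 : min lo z.2 ≤ lo := min_le_left _ _
          have h4 : hi ≤ max hi z.2 := le_max_left _ _
          constructor <;> omega
        · obtain ⟨ha, hb'⟩ := ihrun z hzT hzv
          have h3 : min lo e.2 ≤ lo := min_le_left _ _
          have h4 : hi ≤ max hi e.2 := le_max_left _ _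
          constructor <;> omega
      · intro z1 hz1 z2 hz2 h12
        rcases List.mem_cons.mp hz1 with hz1e | hz1T <;>
          rcases List.mem_cons.mp hz2 with hz2e | hz2T
        · subst hz1e; subst hz2e
          have : (0 : Int) ≤ R := by omega
          omega
        · subst hz1e
          have hz2v : z2.1 = v := by rw [← h12, hev]
          obtain ⟨ha, hb'⟩ := ihrun z2 hz2T hz2v
          have h1 : z1.2 ≤ max hi z1.2 := le_max_right _ _
          omega
        · subst hz2e
          have hz1v : z1.1 = v := by rw [h12, hev]
          obtain ⟨ha, hb'⟩ := ihrun z1 hz1T hz1v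
          have h2 : min lo z2.2 ≤ z2.2 := min_le_right _ _
          omega
        · exact ihpairs z1 hz1T z2 hz2T h12
    · rw [scanR_cons_ne e T b v lo hi hev]
      have hvlt : v < e.1 := lt_of_le_of_ne (hge e (by simp)) (fun h => hev h.symm)
      obtain ⟨ihb, ihcur, ihrun, ihpairs⟩ :=
        ih (max b (hi - lo)) e.1 e.2 e.2 hsort' hhead le_rfl
      set R := scanR T (max b (hi - lo)) e.1 e.2 e.2 with hR
      have hbR : b ≤ R := le_trans (le_max_left _ _) ihb
      have hcurR : hi - lo ≤ R := le_trans (le_max_right _ _) ihb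
      refine ⟨hbR, hcurR, ?_, ?_⟩
      · intro z hz hzv
        rcases List.mem_cons.mp hz with hze | hzT
        · exact absurd (hze ▸ hzv) hev
        · exact absurd hzv (by have := hhead z hzT; omega)
      · intro z1 hz1 z2 hz2 h12
        rcases List.mem_cons.mp hz1 with hz1e | hz1T <;>
          rcases List.mem_cons.mp hz2 with hz2e | hz2T
        · subst hz1e; subst hz2e
          omega
        · subst hz1e
          obtain ⟨ha, hb'⟩ := ihrun z2 hz2T (by rw [← h12])
          omega
        · subst hz2e
          obtain ⟨ha, hb'⟩ := ihrun z1 hz1T (by rw [h12])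
          omega
        · exact ihpairs z1 hz1T z2 hz2T h12

-- ===== VERDICT (by name: the statement is the Claim_ definition above) =====
theorem P3_withfunc_spec : Claim_equal_P3_withfunc := by
  intro A B _ hpre
  unfold Spec_P3_withfunc
  have hAB : A.length ≤ B.length := hpre
  set n := A.length with hn
  set M : Int := ((List.range (n + 1)).map (g A B)).foldl max 0 with hM
  -- A's port computes M
  have hA : P3_withfunc A B = M := by
    have hrfl : P3_withfunc A B =
        ((PySem.List.pyRange 0 ((A.length : Int) + 1) 1).foldl
          (fun (st : Int × PySem.Dict Int Int) i =>
            let diff := (PySem.List.pyGet? (getCumulativeSum A) i).getD 0 -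
                        (PySem.List.pyGet? (getCumulativeSum B) i).getD 0
            match st.2.get? diff with
            | some v => (max st.1 (i - v), st.2)
            | none => (st.1, st.2.insert diff i)) (0, PySem.Dict.empty)).1 := rfl
    have hloop := A_loop A B hAB (n + 1) 0 (by omega) 0 PySem.Dict.empty le_rfl
      (by
        intro w x
        constructor
        · intro hc
          rw [PySem.Dict.get?_empty] at hc
          exact absurd hc (by simp)
        · rintro ⟨t, ht, -⟩
          exact absurd ht (by omega))
    simp only [Nat.cast_zero] at hloop
    rw [hrfl, hloop, hM, List.range_eq_range']
  -- B's port computes the scan of the sorted pair list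
  have hbuilt : ((PySem.List.pyRange 0 (A.length : Int) 1).foldl
      (fun (st : List (Int × Int) × Int) i =>
        let d := st.2 + (PySem.List.pyGet? A i).getD 0 - (PySem.List.pyGet? B i).getD 0
        (st.1 ++ [(d, i + 1)], d)) ([((0 : Int), (0 : Int))], 0)).1 = pairsL A B :=
    build_pairs A B hAB
  set S : List (Int × Int) := PySem.List.sorted (pairsL A B) (fun t => t.1) false with hS
  have hperm : S.Perm (pairsL A B) := PySem.List.sorted_perm _ _ _
  have hmemS : ∀ e, e ∈ S ↔ ∃ i : ℕ, i < n + 1 ∧ e = (pref A B i, (i : Int)) := by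
    intro e
    rw [hperm.mem_iff]
    unfold pairsL
    simp only [List.mem_map, List.mem_range]
    constructor
    · rintro ⟨i, hi, he⟩; exact ⟨i, hi, he.symm⟩
    · rintro ⟨i, hi, he⟩; exact ⟨i, hi, he.symm⟩
  have hsorted : S.Pairwise (fun a c => a.1 ≤ c.1) := PySem.List.sorted_pairwise _ _
  have hSne : S ≠ [] := by
    intro h
    have := hperm.length_eq
    rw [h] at this
    simp [pairsL] at this
  -- pair bound for M: any same-difference gap in S is at most M
  have hM0 : (0 : Int) ≤ M := (PySem.List.le_foldl_max _ _).1
  have hgM : ∀ i : ℕ, i < n + 1 → g A B i ≤ M := by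
    intro i hi
    exact (PySem.List.le_foldl_max _ _).2 (g A B i)
      (List.mem_map.mpr ⟨i, List.mem_range.mpr hi, rfl⟩)
  have Hp : ∀ e1 ∈ S, ∀ e2 ∈ S, e1.1 = e2.1 → e1.2 - e2.2 ≤ M := by
    intro e1 he1 e2 he2 h12
    obtain ⟨i, hi, hei⟩ := (hmemS e1).mp he1
    obtain ⟨j, hj, hej⟩ := (hmemS e2).mp he2
    subst hei; subst hej
    simp only at h12 ⊢
    have hfoij : fo A B i ≤ j := fo_min A B i j h12.symm
    have := hgM i hi
    unfold g at this
    omega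
  cases hcase : S with
  | nil => exact absurd hcase hSne
  | cons h tl =>
    have hBport : P3_withfunc_alt A B = scanR tl 0 h.1 h.2 h.2 := by
      unfold P3_withfunc_alt
      simp only [hbuilt, ← hS, hcase]
      rfl
    rw [hA, hBport]
    have hsorted' : (h :: tl).Pairwise (fun a c => a.1 ≤ c.1) := hcase ▸ hsorted
    have htlpair : tl.Pairwise (fun a c => a.1 ≤ c.1) := hsorted'.of_cons
    have hge : ∀ z ∈ tl, h.1 ≤ z.1 := (List.pairwise_cons.mp hsorted').1
    obtain ⟨hb0, hcur0, hrun0, hpairs0⟩ := scanLB tl 0 h.1 h.2 h.2 htlpair hge le_rfl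
    set R := scanR tl 0 h.1 h.2 h.2 with hR
    have hmemS' : ∀ e, e ∈ h :: tl ↔ ∃ i : ℕ, i < n + 1 ∧ e = (pref A B i, (i : Int)) := by
      intro e; rw [← hcase]; exact hmemS e
    -- full-list pair bound for R
    have SLB : ∀ e1 ∈ h :: tl, ∀ e2 ∈ h :: tl, e1.1 = e2.1 → e1.2 - e2.2 ≤ R := by
      intro e1 he1 e2 he2 h12
      rcases List.mem_cons.mp he1 with rfl | h1t <;> rcases List.mem_cons.mp he2 with rfl | h2t
      · exact hcur0
      · exact (hrun0 e2 h2t h12.symm).2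
      · exact (hrun0 e1 h1t h12).1
      · exact hpairs0 e1 h1t e2 h2t h12
    -- M ≤ R
    have hMR : M ≤ R := by
      rw [hM]
      apply foldl_max_le _ _ _ hb0
      intro y hy
      obtain ⟨i, hi, hgi⟩ := List.mem_map.mp hy
      have hin : i < n + 1 := List.mem_range.mp hi
      have he1 : ((pref A B i, (i : Int)) : Int × Int) ∈ h :: tl :=
        (hmemS' _).mpr ⟨i, hin, rfl⟩
      have he2 : ((pref A B (fo A B i), ((fo A B i : ℕ) : Int)) : Int × Int) ∈ h :: tl :=
        (hmemS' _).mpr ⟨fo A B i, by have := fo_le A B i; omega, rfl⟩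
      have := SLB _ he1 _ he2 (fo_spec A B i).symm
      simp only at this
      rw [← hgi]
      unfold g
      omega
    -- R ≤ M
    have hRM : R ≤ M := by
      have Hp' : ∀ e1 ∈ h :: tl, ∀ e2 ∈ h :: tl, e1.1 = e2.1 → e1.2 - e2.2 ≤ M := by
        rw [← hcase]; exact Hp
      exact scanUB (h :: tl) M Hp' tl 0 h.1 h.2 h.2 hM0 (by omega)
        (by exact List.mem_cons_self) (by exact List.mem_cons_self)
        (fun z hz => List.mem_cons_of_mem _ hz)
    omega
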